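-- pv_equiv track=rewrite | github.com/chenpipi0807/PIP_Assistant | app.py | prepare_chat_history
-- ===== SOURCE A (Python) =====
-- from typing import Generator, List, Dict, Any, Optional
--
-- def prepare_chat_history(messages: List[Dict]) -> List[Dict]:
--     """准备对话历史，确保符合API要求"""
--     cleaned_messages = []
--     for msg in messages:
--         # 深拷贝消息并移除推理内容（API限制）
--         cleaned_msg = {
--             "role": msg["role"],
--             "content": msg["content"]
--         }
--         # 特殊处理系统消息
--         if msg["role"] == "system":
--             if len(cleaned_messages) == 0 or cleaned_messages[0]["role"] != "system":
--                 cleaned_messages.insert(0, cleaned_msg)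
--             continue
--         cleaned_messages.append(cleaned_msg)
--     return cleaned_messages
-- ===== SOURCE B (Python) =====
-- def prepare_chat_history(messages):
--     """准备对话历史，确保符合API要求"""
--     cleaned = [{"role": m["role"], "content": m["content"]} for m in messages]
--     non_system = [c for c in cleaned if c["role"] != "system"]
--     for c in cleaned:
--         if c["role"] == "system":
--             return [c] + non_system
--     return non_system
-- ===== Notes on version B (the rewrite author's own statement) =====
-- stated objective: simpler
-- what changed: Replaces the single accumulator loop with insert(0)/head-inspection/continue by a clean+partition decomposition: clean all messages, filter the non-system ones, and prepend the first system message if one exists.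
import Mathlib
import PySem

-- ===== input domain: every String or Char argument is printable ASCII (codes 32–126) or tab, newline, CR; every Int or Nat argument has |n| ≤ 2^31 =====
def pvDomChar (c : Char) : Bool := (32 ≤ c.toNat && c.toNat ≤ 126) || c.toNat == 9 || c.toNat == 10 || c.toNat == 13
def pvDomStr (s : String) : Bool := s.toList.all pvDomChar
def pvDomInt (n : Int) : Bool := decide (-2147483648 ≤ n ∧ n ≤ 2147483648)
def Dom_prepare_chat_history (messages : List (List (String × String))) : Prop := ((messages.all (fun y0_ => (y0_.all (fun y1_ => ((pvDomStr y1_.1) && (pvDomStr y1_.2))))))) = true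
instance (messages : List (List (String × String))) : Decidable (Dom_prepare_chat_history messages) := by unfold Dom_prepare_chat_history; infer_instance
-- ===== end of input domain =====

-- B replaces the single accumulator loop with insert(0)/head-inspection/continue by a
-- clean + partition decomposition (simpler); return value only, neither version mutates its input.

-- shared helpers: Python dict lookup (first match) and the cleaned two-key dict literal
def pvLook (m : List (String × String)) (k : String) : Option String :=
  (m.find? (fun p => p.1 == k)).map (·.2)

def pvRole (m : List (String × String)) : String := (pvLook m "role").getD ""

def pvClean (m : List (String × String)) : List (String × String) :=
  [("role", (pvLook m "role").getD ""), ("content", (pvLook m "content").getD "")]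

-- ===== PORT A =====
-- loop body of A: build cleaned_msg, hoist/drop system messages, append the rest
def pvStepA (cleaned : List (List (String × String))) (msg : List (String × String)) :
    List (List (String × String)) :=
  let cm := pvClean msg
  if pvRole msg == "system" then
    if cleaned.length == 0 || !(pvRole ((PySem.List.pyGet? cleaned 0).getD []) == "system") then
      cm :: cleaned          -- cleaned_messages.insert(0, cleaned_msg)
    else cleaned
  else cleaned ++ [cm]

def prepare_chat_history (messages : List (List (String × String))) : List (List (String × String)) :=
  messages.foldl pvStepA []

-- ===== PORT B =====
def prepare_chat_history_alt (messages : List (List (String × String))) : List (List (String × String)) :=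
  let cleaned := messages.map pvClean
  let nonSystem := cleaned.filter (fun c => !(pvRole c == "system"))
  match cleaned.find? (fun c => pvRole c == "system") with   -- B's early-returning for-loop
  | some c => c :: nonSystem
  | none => nonSystem

-- ===== PRECONDITION & SPEC =====
-- Pre_ excludes exactly the inputs where Python A raises KeyError: a message missing "role" or "content"
def Pre_prepare_chat_history (messages : List (List (String × String))) : Prop :=
  messages.all (fun m => (pvLook m "role").isSome && (pvLook m "content").isSome) = true
instance (messages : List (List (String × String))) : Decidable (Pre_prepare_chat_history messages) := by
  unfold Pre_prepare_chat_history; infer_instance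

def pvWitness_prepare_chat_history : (List (List (String × String))) :=
  [[("role", "system"), ("content", "be nice")], [("role", "user"), ("content", "hi")]]

def Spec_prepare_chat_history (messages : List (List (String × String))) (out : List (List (String × String))) : Prop := out = prepare_chat_history_alt messages
instance (messages : List (List (String × String))) (out : List (List (String × String))) : Decidable (Spec_prepare_chat_history messages out) := by unfold Spec_prepare_chat_history; infer_instance

-- ===== CLAIM (what is proved, stated in full; the proofs are below) =====
def Claim_equal_prepare_chat_history : Prop := ∀ (messages : List (List (String × String))), Dom_prepare_chat_history messages → Pre_prepare_chat_history messages → Spec_prepare_chat_history messages (prepare_chat_history messages)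

-- ===== LEMMAS AND PROOFS =====

theorem pvRole_clean (m : List (String × String)) : pvRole (pvClean m) = pvRole m := by
  simp [pvRole, pvClean, pvLook]

-- once a system message sits at the head, A only appends non-system messages
theorem foldA_sys (msgs : List (List (String × String))) :
    ∀ (s : List (String × String)) (acc : List (List (String × String))),
    pvRole s = "system" →
    List.foldl pvStepA (s :: acc) msgs
      = s :: (acc ++ (msgs.map pvClean).filter (fun c => !(pvRole c == "system"))) := by
  induction msgs with
  | nil => intro s acc _; simp
  | cons m rest ih =>
    intro s acc hs
    by_cases h : pvRole m = "system"
    · have : pvStepA (s :: acc) m = s :: acc := by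
        simp [pvStepA, h, hs, PySem.List.pyGet?, PySem.List.pyIdx?]
      simp only [List.foldl_cons, this, ih s acc hs, List.map_cons, List.filter_cons,
        pvRole_clean, h]
      simp
    · have : pvStepA (s :: acc) m = s :: (acc ++ [pvClean m]) := by
        simp [pvStepA, h]
      simp only [List.foldl_cons, this, ih s (acc ++ [pvClean m]) hs, List.map_cons,
        List.filter_cons, pvRole_clean]
      simp [h]
-- before any system message arrives, the accumulator is all non-system
theorem foldA_nosys (msgs : List (List (String × String))) :
    ∀ (acc : List (List (String × String))),
    (∀ c ∈ acc, ¬ pvRole c = "system") →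
    List.foldl pvStepA acc msgs
      = (match (msgs.map pvClean).find? (fun c => pvRole c == "system") with
         | some s => s :: (acc ++ (msgs.map pvClean).filter (fun c => !(pvRole c == "system")))
         | none => acc ++ (msgs.map pvClean).filter (fun c => !(pvRole c == "system"))) := by
  induction msgs with
  | nil => intro acc _; simp
  | cons m rest ih =>
    intro acc hacc
    by_cases h : pvRole m = "system"
    · have hstep : pvStepA acc m = pvClean m :: acc := by
        cases acc with
        | nil => simp [pvStepA, h]
        | cons c cs =>
          have := hacc c (by simp)
          simp [pvStepA, h, PySem.List.pyGet?, PySem.List.pyIdx?, this]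
      have hsc : pvRole (pvClean m) = "system" := by rw [pvRole_clean]; exact h
      simp only [List.foldl_cons, hstep, foldA_sys rest (pvClean m) acc hsc,
        List.map_cons, List.find?_cons, List.filter_cons, pvRole_clean, h]
      simp
    · have hstep : pvStepA acc m = acc ++ [pvClean m] := by simp [pvStepA, h]
      have hacc' : ∀ c ∈ acc ++ [pvClean m], ¬ pvRole c = "system" := by
        intro c hc
        rcases List.mem_append.mp hc with hc | hc
        · exact hacc c hc
        · simp at hc; subst hc; rw [pvRole_clean]; exact h
      simp only [List.foldl_cons, hstep, ih (acc ++ [pvClean m]) hacc',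
        List.map_cons, List.find?_cons, List.filter_cons, pvRole_clean]
      have hb : (pvRole m == "system") = false := by simp [h]
      cases hf : (rest.map pvClean).find? (fun c => pvRole c == "system") <;> simp [hb]

-- ===== VERDICT (by name: the statement is the Claim_ definition above) =====
theorem prepare_chat_history_spec : Claim_equal_prepare_chat_history := by
  intro messages _ _
  unfold Spec_prepare_chat_history prepare_chat_history prepare_chat_history_alt
  rw [foldA_nosys messages [] (by simp)]
  cases hf : (messages.map pvClean).find? (fun c => pvRole c == "system") <;> simp [hf]
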